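-- pv_equiv track=rewrite | github.com/3sxtra/3sxtra | move_gd3rd.py | remove_blocks
-- ===== SOURCE A (Python) =====
-- def remove_blocks(text, prefixes):
--     extracted = []
--     lines = text.split("\n")
--     i = 0
--     while i < len(lines):
--         line = lines[i]
--         matched = False
--         for p in prefixes:
--             if line.startswith(p):
--                 matched = True
--                 break
--         if matched:
--             start_i = i
--             # Check for doc block
--             if i > 0 and lines[i - 1] == " */":
--                 doc_start = i - 1
--                 while doc_start > 0 and not lines[doc_start].startswith("/**"):
--                     doc_start -= 1
--                 if lines[doc_start].startswith("/**"):
--                     start_i = doc_start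
--
--             # Find end of function
--             end_i = i
--             stack = 0
--             in_fn = False
--             while end_i < len(lines):
--                 for c in lines[end_i]:
--                     if c == "{":
--                         stack += 1
--                         in_fn = True
--                     elif c == "}":
--                         stack -= 1
--                 if in_fn and stack == 0:
--                     break
--                 end_i += 1
--
--             block = "\n".join(lines[start_i : end_i + 1]) + "\n"
--             extracted.append(block)
--             del lines[start_i : end_i + 1]
--             i = start_i  # re-evaluate at this position
--         else:
--             i += 1
--
--     return "\n".join(extracted), "\n".join(lines)
-- ===== SOURCE B (Python) =====
-- def remove_blocks(text, prefixes):
--     # Single forward pass: non-matching lines go to a kept buffer; on a match,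
--     # doc-comment lines are popped off the back of the buffer and the function
--     # body is consumed forward using per-line brace counts. No list deletions or index resets.
--     lines = text.split("\n")
--     n = len(lines)
--     kept = []
--     extracted = []
--     pos = 0
--     while pos < n:
--         line = lines[pos]
--         if any(line.startswith(p) for p in prefixes):
--             # pop doc block off kept buffer
--             doc = []
--             if kept and kept[-1] == " */":
--                 j = len(kept) - 1
--                 while j > 0 and not kept[j].startswith("/**"):
--                     j -= 1
--                 if kept[j].startswith("/**"):
--                     doc = kept[j:]
--                     del kept[j:]
--             # consume body forward, counting braces
--             body = []
--             stack = 0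
--             in_fn = False
--             while pos < n:
--                 cur = lines[pos]
--                 opens = cur.count("{")
--                 stack += opens - cur.count("}")
--                 if opens:
--                     in_fn = True
--                 body.append(cur)
--                 pos += 1
--                 if in_fn and stack == 0:
--                     break
--             extracted.append("\n".join(doc + body) + "\n")
--         else:
--             kept.append(line)
--             pos += 1
--     return "\n".join(extracted), "\n".join(kept)
-- ===== Notes on version B (the rewrite author's own statement) =====
-- stated objective: alternative
-- what changed: B replaces A's in-place slice deletions and index resets by a single forward pass that appends non-matching lines to a kept buffer, pops doc-comment lines off the buffer's back, and consumes each function body with a per-line brace count (line.count) instead of A's per-character loop.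
import Mathlib
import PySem

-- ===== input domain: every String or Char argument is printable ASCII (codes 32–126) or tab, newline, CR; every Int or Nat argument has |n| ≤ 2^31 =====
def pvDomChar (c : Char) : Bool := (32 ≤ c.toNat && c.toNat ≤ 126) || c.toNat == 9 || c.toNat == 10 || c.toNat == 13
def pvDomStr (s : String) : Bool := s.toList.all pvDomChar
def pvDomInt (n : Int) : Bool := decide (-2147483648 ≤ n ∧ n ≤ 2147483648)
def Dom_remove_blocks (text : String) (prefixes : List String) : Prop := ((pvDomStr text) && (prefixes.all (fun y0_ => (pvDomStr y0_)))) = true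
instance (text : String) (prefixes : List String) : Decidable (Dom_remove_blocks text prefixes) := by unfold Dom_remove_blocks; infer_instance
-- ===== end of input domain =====

-- B replaces A's in-place deletions and index resets by one forward pass with a
-- kept-lines buffer (doc lines popped off its back) and per-line brace counts.

-- ===== PORT A =====

-- `for c in lines[end_i]: …` — the per-character brace counter of A
def aScanLine (s : String) (st : Int × Bool) : Int × Bool :=
  s.toList.foldl
    (fun st c =>
      if c = '{' then (st.1 + 1, true)
      else if c = '}' then (st.1 - 1, st.2) else st) st

-- `while doc_start > 0 and not lines[doc_start].startswith("/**"): doc_start -= 1`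
def aDocScan (lines : List String) (j : Nat) : Nat :=
  if h : 0 < j ∧ ¬ PySem.Str.startswith (lines.getD j "") "/**" then aDocScan lines (j - 1) else j
termination_by j
decreasing_by exact Nat.sub_lt h.1 Nat.one_pos

-- `start_i` after the doc-block check of A
def aStart (lines : List String) (i : Nat) : Nat :=
  if 0 < i ∧ lines.getD (i - 1) "" = " */" then
    if PySem.Str.startswith (lines.getD (aDocScan lines (i - 1)) "") "/**" then
      aDocScan lines (i - 1)
    else i
  else i

-- `while end_i < len(lines): … end_i += 1` — find end of function by brace count
def aFindEnd (lines : List String) (e : Nat) (stack : Int) (in_fn : Bool) : Nat :=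
  if h : e < lines.length then
    let st := aScanLine (lines.getD e "") (stack, in_fn)
    if st.2 ∧ st.1 = 0 then e else aFindEnd lines (e + 1) st.1 st.2
  else e
termination_by lines.length - e
decreasing_by exact Nat.sub_succ_lt_self lines.length e h

theorem aDocScan_le (lines : List String) (j : Nat) : aDocScan lines j ≤ j := by
  fun_induction aDocScan lines j with
  | case1 j h ih => omega
  | case2 j h => exact le_refl j

theorem aStart_le (lines : List String) (i : Nat) : aStart lines i ≤ i := by
  unfold aStart
  have := aDocScan_le lines (i - 1)
  split
  · split <;> omega
  · exact le_refl i

theorem aFindEnd_ge (lines : List String) (e : Nat) (stack : Int) (in_fn : Bool) :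
    e ≤ aFindEnd lines e stack in_fn := by
  fun_induction aFindEnd lines e stack in_fn with
  | case1 e stack in_fn h st hstop => exact le_refl e
  | case2 e stack in_fn h st hstop ih => omega
  | case3 e stack in_fn h => exact le_refl e

theorem aLoop_dec1 (lines : List String) (i : Nat) (h : i < lines.length) :
    (lines.take (aStart lines i) ++ lines.drop (aFindEnd lines i 0 false + 1)).length
      < lines.length := by
  have h1 := aStart_le lines i
  have h2 := aFindEnd_ge lines i 0 false
  rw [List.length_append, List.length_take, List.length_drop]
  omega

theorem aLoop_dec2 (lines : List String) (i : Nat) (h : i < lines.length) :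
    lines.length - (i + 1) < lines.length - i := by omega

-- the `while i < len(lines)` loop of A, with in-place `del` and `i = start_i`
def aLoop (prefixes extracted lines : List String) (i : Nat) : List String × List String :=
  if h : i < lines.length then
    if prefixes.any (fun p => PySem.Str.startswith (lines.getD i "") p) then
      aLoop prefixes
        (extracted ++ [PySem.Str.join "\n"
            (PySem.List.slice lines (some ((aStart lines i : Nat) : Int))
              (some ((aFindEnd lines i 0 false + 1 : Nat) : Int))) ++ "\n"])
        (lines.take (aStart lines i) ++ lines.drop (aFindEnd lines i 0 false + 1))
        (aStart lines i)
    else aLoop prefixes extracted lines (i + 1)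
  else (extracted, lines)
termination_by (lines.length, lines.length - i)
decreasing_by
  · exact Prod.Lex.left _ _ (aLoop_dec1 lines i h)
  · exact Prod.Lex.right _ (aLoop_dec2 lines i h)

def remove_blocks (text : String) (prefixes : List String) : String × String :=
  let lines := (PySem.Str.split? text "\n").getD []
  let r := aLoop prefixes [] lines 0
  (PySem.Str.join "\n" r.1, PySem.Str.join "\n" r.2)

-- ===== PORT B =====

-- B's per-line brace bookkeeping: `opens = cur.count("{")`, `stack += opens - cur.count("}")`,
-- `if opens: in_fn = True`
def bLineDelta (l : String) (stack : Int) (in_fn : Bool) : Int × Bool :=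
  let opens := PySem.Str.count l "{"
  (stack + (opens : Int) - (PySem.Str.count l "}" : Int), in_fn || decide (opens ≠ 0))

-- walk the kept buffer (stored in reverse) back towards its front, looking for "/**";
-- the singleton case is `j > 0` becoming false at the buffer's first line
def bScanDoc (rkept acc : List String) : Option (List String × List String) :=
  match rkept with
  | [] => none
  | [x] => if PySem.Str.startswith x "/**" then some (x :: acc, []) else none
  | x :: rest =>
      if PySem.Str.startswith x "/**" then some (x :: acc, rest)
      else bScanDoc rest (x :: acc)

-- pop a doc block (`/** … */`) off the back of the kept buffer, if present
def bPopDoc (rkept : List String) : List String × List String :=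
  if rkept.head? = some " */" then
    match bScanDoc rkept [] with
    | some r => r
    | none => ([], rkept)
  else ([], rkept)

-- consume the function body forward, counting braces; returns (body, rest)
def bTakeBlock (lines : List String) (stack : Int) (in_fn : Bool) (acc : List String) :
    List String × List String :=
  match lines with
  | [] => (acc.reverse, [])
  | l :: rest =>
    let st := bLineDelta l stack in_fn
    if st.2 ∧ st.1 = 0 then ((l :: acc).reverse, rest)
    else bTakeBlock rest st.1 st.2 (l :: acc)

theorem bTakeBlock_rest_le (lines : List String) (stack : Int) (in_fn : Bool)
    (acc : List String) :
    (bTakeBlock lines stack in_fn acc).2.length + 1 ≤ lines.length + 1 := by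
  fun_induction bTakeBlock lines stack in_fn acc
  · simp
  · simp
  · simp; omega

theorem bTakeBlock_rest_lt (lines : List String) (stack : Int) (in_fn : Bool)
    (acc : List String) (h : lines ≠ []) :
    (bTakeBlock lines stack in_fn acc).2.length < lines.length := by
  match lines with
  | l :: rest =>
    simp only [bTakeBlock]
    split
    · simp
    · have := bTakeBlock_rest_le rest ((bLineDelta l stack in_fn).1)
        ((bLineDelta l stack in_fn).2) (l :: acc)
      simp only [List.length_cons]
      omega

-- B's single forward pass: kept buffer held reversed, blocks appended as found
def bGo (prefixes lines rkept extracted : List String) : List String × List String :=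
  match lines with
  | [] => (extracted, rkept.reverse)
  | line :: rest =>
    if prefixes.any (fun p => PySem.Str.startswith line p) then
      bGo prefixes (bTakeBlock (line :: rest) 0 false []).2 (bPopDoc rkept).2
        (extracted ++ [PySem.Str.join "\n"
            ((bPopDoc rkept).1 ++ (bTakeBlock (line :: rest) 0 false []).1) ++ "\n"])
    else bGo prefixes rest (line :: rkept) extracted
termination_by lines.length
decreasing_by
  · exact bTakeBlock_rest_lt (line :: rest) 0 false [] (List.cons_ne_nil line rest)
  · exact Nat.lt_succ_self rest.length

def remove_blocks_alt (text : String) (prefixes : List String) : String × String :=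
  let lines := (PySem.Str.split? text "\n").getD []
  let r := bGo prefixes lines [] []
  (PySem.Str.join "\n" r.1, PySem.Str.join "\n" r.2)

-- ===== PRECONDITION & SPEC =====
def Spec_remove_blocks (text : String) (prefixes : List String) (out : String × String) : Prop := out = remove_blocks_alt text prefixes
instance (text : String) (prefixes : List String) (out : String × String) : Decidable (Spec_remove_blocks text prefixes out) := by unfold Spec_remove_blocks; infer_instance

-- ===== CLAIM (what is proved, stated in full; the proofs are below) =====
def Claim_equal_remove_blocks : Prop := ∀ (text : String) (prefixes : List String), Dom_remove_blocks text prefixes → Spec_remove_blocks text prefixes (remove_blocks text prefixes)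

-- ===== LEMMAS AND PROOFS =====

theorem take_succ_reverse (l : List String) (j : Nat) (h : j < l.length) :
    (l.take (j+1)).reverse = l.getD j "" :: (l.take j).reverse := by
  rw [List.take_add_one, List.getElem?_eq_getElem h]
  simp [List.getD, List.getElem?_eq_getElem h]

theorem drop_eq_getD_cons (l : List String) (j : Nat) (h : j < l.length) :
    l.drop j = l.getD j "" :: l.drop (j+1) := by
  rw [List.drop_eq_getElem_cons h]
  simp [List.getD, List.getElem?_eq_getElem h]

theorem go_count_single (c : Char) :
    ∀ (fuel : Nat) (s : List Char) (acc : Nat), s.length ≤ fuel →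
      PySem.Chars.count.go [c] fuel s acc = acc + s.count c := by
  intro fuel
  induction fuel with
  | zero =>
    intro s acc h
    have : s = [] := List.eq_nil_of_length_eq_zero (by omega)
    subst this
    simp [PySem.Chars.count.go]
  | succ n ih =>
    intro s acc h
    cases s with
    | nil => simp [PySem.Chars.count.go]
    | cons x t =>
      simp only [PySem.Chars.count.go]
      by_cases hx : c = x
      · subst hx
        rw [if_pos (by simp)]
        simp only [List.length_singleton, List.drop_succ_cons, List.drop_zero]
        rw [ih t (acc+1) (by simpa using h)]
        simp [List.count_cons]
        omega
      · rw [if_neg (by simp [List.isPrefixOf]; intro hh; exact hx hh)]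
        rw [ih t acc (by simpa using h)]
        rw [List.count_cons]
        simp [Ne.symm hx]

theorem count_single (s : List Char) (c : Char) :
    PySem.Chars.count s [c] = s.count c := by
  rw [PySem.Chars.count]
  simp only [List.isEmpty_cons, Bool.false_eq_true, if_false]
  rw [go_count_single c s.length s 0 (le_refl _)]
  omega

theorem aScanLine_chars (cs : List Char) :
    ∀ (stack : Int) (b : Bool),
    cs.foldl (fun st c =>
      if c = '{' then (st.1 + 1, true)
      else if c = '}' then (st.1 - 1, st.2) else st) (stack, b)
      = (stack + (cs.count '{' : Int) - (cs.count '}' : Int),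
         b || decide (cs.count '{' ≠ 0)) := by
  induction cs with
  | nil => intro stack b; simp
  | cons x t ih =>
    intro stack b
    simp only [List.foldl_cons]
    by_cases h1 : x = '{'
    · subst h1
      rw [ih]
      simp [List.count_cons]
      ring
    · by_cases h2 : x = '}'
      · subst h2
        rw [if_neg (by decide), if_pos rfl, ih]
        simp [h1]
        push_cast; ring
      · rw [if_neg h1, if_neg h2, ih]
        simp [h1, h2]

theorem bLineDelta_eq (l : String) (stack : Int) (in_fn : Bool) :
    bLineDelta l stack in_fn = aScanLine l (stack, in_fn) := by
  unfold bLineDelta aScanLine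
  rw [aScanLine_chars l.toList stack in_fn]
  have h1 : ("{" : String).toList = ['{'] := rfl
  have h2 : ("}" : String).toList = ['}'] := rfl
  rw [PySem.Str.count_eq, PySem.Str.count_eq, h1, h2, count_single, count_single]

theorem takeBlock_eq (lines : List String) (e : Nat) (stack : Int) (in_fn : Bool) :
    ∀ acc : List String,
    bTakeBlock (lines.drop e) stack in_fn acc =
      (acc.reverse ++ (lines.drop e).take (aFindEnd lines e stack in_fn + 1 - e),
       lines.drop (aFindEnd lines e stack in_fn + 1)) := by
  fun_induction aFindEnd lines e stack in_fn with
  | case1 e stack in_fn h st hstop =>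
    intro acc
    rw [drop_eq_getD_cons lines e h]
    simp only [bTakeBlock, bLineDelta_eq]
    rw [if_pos hstop]
    simp
  | case2 e stack in_fn h st hstop ih =>
    intro acc
    have hge := aFindEnd_ge lines (e+1) st.1 st.2
    rw [drop_eq_getD_cons lines e h]
    simp only [bTakeBlock, bLineDelta_eq]
    rw [if_neg hstop]
    rw [ih]
    have h3 : aFindEnd lines (e+1) st.1 st.2 + 1 - e
        = (aFindEnd lines (e+1) st.1 st.2 + 1 - (e+1)) + 1 := by omega
    rw [h3, List.take_succ_cons]
    simp
  | case3 e stack in_fn h =>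
    intro acc
    have h1 : lines.drop e = [] := List.drop_eq_nil_of_le (by omega)
    have h2 : lines.drop (e+1) = [] := List.drop_eq_nil_of_le (by omega)
    simp [h1, h2, bTakeBlock]

theorem scanDoc_eq (lines : List String) (j : Nat) :
    ∀ acc : List String, j < lines.length →
    bScanDoc ((lines.take (j + 1)).reverse) acc =
      (if PySem.Str.startswith (lines.getD (aDocScan lines j) "") "/**"
       then some ((lines.drop (aDocScan lines j)).take (j + 1 - aDocScan lines j) ++ acc,
                  (lines.take (aDocScan lines j)).reverse)
       else none) := by
  fun_induction aDocScan lines j with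
  | case1 j hc ih =>
    intro acc hj
    obtain ⟨hj0, hns⟩ := hc
    rw [take_succ_reverse lines j hj]
    have hlt : 0 < (lines.take j).length := by rw [List.length_take]; omega
    have hne : (lines.take j).reverse ≠ [] := by
      simp only [ne_eq, List.reverse_eq_nil_iff]
      exact List.ne_nil_of_length_pos hlt
    obtain ⟨y, ys, hyy⟩ := List.exists_cons_of_ne_nil hne
    rw [hyy]
    show bScanDoc (lines.getD j "" :: y :: ys) acc = _
    rw [bScanDoc, if_neg hns, ← hyy]
    have hj1 : j - 1 + 1 = j := by omega
    have ihx := ih (lines.getD j "" :: acc) (by omega)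
    rw [hj1] at ihx
    rw [ihx]
    have hd := aDocScan_le lines (j - 1)
    split
    · have h1 : j + 1 - aDocScan lines (j-1) = (j - aDocScan lines (j-1)) + 1 := by omega
      have h2 : (lines.drop (aDocScan lines (j-1))).take (j + 1 - aDocScan lines (j-1))
          = (lines.drop (aDocScan lines (j-1))).take (j - aDocScan lines (j-1))
            ++ [lines.getD j ""] := by
        rw [h1, List.take_add_one, List.getElem?_drop]
        have h3 : aDocScan lines (j-1) + (j - aDocScan lines (j-1)) = j := by omega
        rw [h3, List.getElem?_eq_getElem hj]
        simp [List.getD, List.getElem?_eq_getElem hj]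
      rw [h2]
      simp
    · rfl
    · simp
  | case2 j hc =>
    intro acc hj
    rcases Decidable.em (0 < j) with hj0 | hj0
    · have hsw : PySem.Str.startswith (lines.getD j "") "/**" = true := by
        by_contra hn
        exact hc ⟨hj0, hn⟩
      rw [take_succ_reverse lines j hj]
      have hlt : 0 < (lines.take j).length := by rw [List.length_take]; omega
      have hne : (lines.take j).reverse ≠ [] := by
        simp only [ne_eq, List.reverse_eq_nil_iff]
        exact List.ne_nil_of_length_pos hlt
      obtain ⟨y, ys, hyy⟩ := List.exists_cons_of_ne_nil hne
      rw [hyy]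
      show bScanDoc (lines.getD j "" :: y :: ys) acc = _
      rw [bScanDoc, if_pos hsw, ← hyy]
      have h4 : j + 1 - j = 1 := by omega
      rw [h4, drop_eq_getD_cons lines j hj]
      simp
      simpa [List.getD] using hsw
      simp
    · have hj0' : j = 0 := by omega
      subst hj0'
      rw [take_succ_reverse lines 0 hj]
      simp only [List.take_zero, List.reverse_nil]
      show bScanDoc [lines.getD 0 ""] acc = _
      rw [bScanDoc]
      have h5 : lines.take 1 = [lines.getD 0 ""] := by
        have := drop_eq_getD_cons lines 0 hj
        simp only [List.drop_zero] at this
        rw [List.take_add_one]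
        simp [List.getD]
        cases lines with
        | nil => simp at hj
        | cons a t => simp
      split
    
      · rw [List.drop_zero]
        have h6 : (0:Nat) + 1 - 0 = 1 := rfl
        rw [h6, h5]
        simp
      · rfl

theorem popDoc_eq (lines : List String) (i : Nat) (hi : i ≤ lines.length) :
    bPopDoc ((lines.take i).reverse) =
      ((lines.drop (aStart lines i)).take (i - aStart lines i),
       (lines.take (aStart lines i)).reverse) := by
  rcases Nat.eq_zero_or_pos i with hz | hp
  · subst hz
    have : aStart lines 0 = 0 := by unfold aStart; simp
    rw [this]
    simp [bPopDoc]
  · have hj : i - 1 < lines.length := by omega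
    have hi1 : i - 1 + 1 = i := by omega
    have hhd : ((lines.take i).reverse).head? = some (lines.getD (i-1) "") := by
      rw [← hi1, take_succ_reverse lines (i-1) hj]
      rfl
    by_cases hsep : lines.getD (i - 1) "" = " */"
    · have hcond : ((lines.take i).reverse).head? = some " */" := by rw [hhd, hsep]
      unfold bPopDoc
      rw [if_pos hcond]
      have hs := scanDoc_eq lines (i-1) [] hj
      rw [hi1] at hs
      have hA : (0 < i ∧ lines.getD (i - 1) "" = " */") := ⟨hp, hsep⟩
      by_cases hsw : PySem.Str.startswith (lines.getD (aDocScan lines (i-1)) "") "/**" = true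
      · rw [if_pos hsw] at hs
        rw [hs]
        have hst : aStart lines i = aDocScan lines (i-1) := by
          unfold aStart; rw [if_pos hA, if_pos hsw]
        rw [hst]
        simp
      · rw [if_neg hsw] at hs
        rw [hs]
        have hst : aStart lines i = i := by
          unfold aStart; rw [if_pos hA, if_neg hsw]
        rw [hst]
        simp
    · have hcond : ¬ ((lines.take i).reverse).head? = some " */" := by
        rw [hhd]; simpa [List.getD] using hsep
      unfold bPopDoc
      rw [if_neg hcond]
      unfold aStart
      have : ¬ (0 < i ∧ lines.getD (i - 1) "" = " */") := by
        intro ⟨_, h2⟩; exact hsep h2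
      rw [if_neg this]
      simp

theorem loop_eq (prefixes extracted lines : List String) (i : Nat) :
    aLoop prefixes extracted lines i =
      bGo prefixes (lines.drop i) ((lines.take i).reverse) extracted := by
  fun_induction aLoop prefixes extracted lines i with
  | case1 extracted lines i h hm ih =>
    rw [ih]
    rw [drop_eq_getD_cons lines i h, bGo, if_pos hm, ← drop_eq_getD_cons lines i h]
    rw [takeBlock_eq lines i 0 false [], popDoc_eq lines i (le_of_lt h)]
    have hs := aStart_le lines i
    have hE := aFindEnd_ge lines i 0 false
    have hlen : (lines.take (aStart lines i)).length = aStart lines i := by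
      rw [List.length_take]; omega
    congr 1
    · rw [List.drop_left' hlen]
    · rw [List.take_left' hlen]
    · congr 2
      rw [PySem.List.slice_natCast]
      have h8 : aFindEnd lines i 0 false + 1 - aStart lines i
          = (i - aStart lines i) + (aFindEnd lines i 0 false + 1 - i) := by omega
      rw [h8, List.take_add, List.drop_drop]
      have h9 : aStart lines i + (i - aStart lines i) = i := by omega
      rw [h9]
      simp
  | case2 extracted lines i h hm ih =>
    rw [ih, take_succ_reverse lines i h]
    rw [drop_eq_getD_cons lines i h, bGo, if_neg hm]
  | case3 extracted lines i h =>
    have h1 : lines.drop i = [] := List.drop_eq_nil_of_le (by omega)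
    have h2 : lines.take i = lines := List.take_of_length_le (by omega)
    rw [h1, h2, bGo]
    simp

-- ===== VERDICT (by name: the statement is the Claim_ definition above) =====
theorem remove_blocks_spec : Claim_equal_remove_blocks := by
  intro text prefixes _
  unfold Spec_remove_blocks remove_blocks remove_blocks_alt
  simp [loop_eq]
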